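-- pv_equiv track=rewrite | github.com/Mickael7474/ao-hunter-dashboard | questions_acheteur.py | formater_questions_email
-- ===== SOURCE A (Python) =====
-- def formater_questions_email(questions: list, ao: dict) -> str:
--     """
--     Formate les questions en email poli pret a copier-coller pour la plateforme.
--
--     Args:
--         questions: liste de questions (dicts avec question, justification, impact, categorie)
--         ao: dict de l'AO
--
--     Returns:
--         str: texte de l'email formate
--     """
--     titre = ao.get("titre", "la consultation")
--     acheteur = ao.get("acheteur", "")
--     ref = ao.get("id", "").replace("BOAMP-", "").replace("PLACE-", "").replace("TED-", "").replace("MSEC-", "").replace("AWS-", "")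
--
--     # Grouper par categorie
--     par_categorie = {}
--     for q in questions:
--         cat = q.get("categorie", "technique")
--         if cat not in par_categorie:
--             par_categorie[cat] = []
--         par_categorie[cat].append(q)
--
--     cat_labels = {
--         "budget": "Questions budgetaires",
--         "technique": "Questions techniques",
--         "administratif": "Questions administratives",
--         "planning": "Questions sur le planning",
--     }
--
--     lignes = []
--     lignes.append(f"Objet : Demande de precisions - {titre[:80]}")
--     lignes.append("")
--     lignes.append("Madame, Monsieur,")
--     lignes.append("")
--     lignes.append(f"Dans le cadre de notre reponse a la consultation \"{titre[:100]}\"{f' (ref. {ref})' if ref else ''}, nous souhaiterions obtenir les precisions suivantes afin de vous proposer une offre la plus adaptee possible :")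
--     lignes.append("")
--
--     num = 1
--     for cat_id in ["technique", "budget", "planning", "administratif"]:
--         if cat_id not in par_categorie:
--             continue
--         lignes.append(f"--- {cat_labels.get(cat_id, cat_id)} ---")
--         lignes.append("")
--         for q in par_categorie[cat_id]:
--             lignes.append(f"{num}. {q['question']}")
--             num += 1
--         lignes.append("")
--
--     lignes.append("Nous vous remercions par avance pour ces precisions qui nous permettront de formuler une offre de qualite.")
--     lignes.append("")
--     lignes.append("Cordialement,")
--     lignes.append("")
--     lignes.append("Mickael Bertolla")
--     lignes.append("President - Almera (AI MENTOR)")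
--     lignes.append("25 rue Campagne Premiere, 75014 Paris")
--     lignes.append("Tel : 06 86 68 06 11")
--     lignes.append("Email : contact@almera.one")
--
--     return "\n".join(lignes)
-- ===== SOURCE B (Python) =====
-- def formater_questions_email(questions: list, ao: dict) -> str:
--     """Same email, but without the grouping dict: one filter pass per category."""
--     titre = ao.get("titre", "la consultation")
--     ref = ao.get("id", "").replace("BOAMP-", "").replace("PLACE-", "").replace("TED-", "").replace("MSEC-", "").replace("AWS-", "")
--
--     labels = {
--         "technique": "Questions techniques",
--         "budget": "Questions budgetaires",
--         "planning": "Questions sur le planning",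
--         "administratif": "Questions administratives",
--     }
--
--     lignes = [
--         f"Objet : Demande de precisions - {titre[:80]}",
--         "",
--         "Madame, Monsieur,",
--         "",
--         f"Dans le cadre de notre reponse a la consultation \"{titre[:100]}\"{f' (ref. {ref})' if ref else ''}, nous souhaiterions obtenir les precisions suivantes afin de vous proposer une offre la plus adaptee possible :",
--         "",
--     ]
--
--     num = 1
--     for cat_id in ("technique", "budget", "planning", "administratif"):
--         matching = [q for q in questions if q.get("categorie", "technique") == cat_id]
--         if not matching:
--             continue
--         lignes.append(f"--- {labels[cat_id]} ---")
--         lignes.append("")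
--         for q in matching:
--             lignes.append(f"{num}. {q['question']}")
--             num += 1
--         lignes.append("")
--
--     lignes += [
--         "Nous vous remercions par avance pour ces precisions qui nous permettront de formuler une offre de qualite.",
--         "",
--         "Cordialement,",
--         "",
--         "Mickael Bertolla",
--         "President - Almera (AI MENTOR)",
--         "25 rue Campagne Premiere, 75014 Paris",
--         "Tel : 06 86 68 06 11",
--         "Email : contact@almera.one",
--     ]
--     return "\n".join(lignes)
-- ===== Notes on version B (the rewrite author's own statement) =====
-- stated objective: simpler
-- what changed: B drops A's par_categorie grouping dict entirely and instead filters the questions list once per emitted category (keeping the 'technique' default and the shared running number), skipping categories whose filter is empty.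
import Mathlib
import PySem

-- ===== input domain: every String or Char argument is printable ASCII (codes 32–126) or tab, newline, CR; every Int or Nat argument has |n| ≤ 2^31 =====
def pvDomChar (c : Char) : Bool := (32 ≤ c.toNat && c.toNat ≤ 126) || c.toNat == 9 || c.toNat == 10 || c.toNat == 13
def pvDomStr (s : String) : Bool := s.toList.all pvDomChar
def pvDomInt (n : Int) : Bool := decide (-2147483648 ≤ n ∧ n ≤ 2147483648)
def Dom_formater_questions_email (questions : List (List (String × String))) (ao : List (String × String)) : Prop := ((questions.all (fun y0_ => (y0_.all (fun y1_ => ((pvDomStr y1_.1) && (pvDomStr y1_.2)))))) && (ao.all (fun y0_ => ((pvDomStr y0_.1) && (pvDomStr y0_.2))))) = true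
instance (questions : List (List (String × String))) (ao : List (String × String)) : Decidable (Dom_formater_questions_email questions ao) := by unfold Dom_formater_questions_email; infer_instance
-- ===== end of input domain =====

-- B replaces A's grouping dict by one filter pass per category (simpler); return values proved equal on Pre_.

-- ===== PORT A =====
-- literal transliteration of A: build par_categorie by a dict-grouping loop, then walk the four categories.
def formater_questions_email (questions : List (List (String × String))) (ao : List (String × String)) : String :=
  let aoD := PySem.Dict.mk ao
  let titre := aoD.getD "titre" "la consultation"
  let _acheteur := aoD.getD "acheteur" ""
  let ref := PySem.Str.replace (PySem.Str.replace (PySem.Str.replace (PySem.Str.replace (PySem.Str.replace (aoD.getD "id" "") "BOAMP-" "") "PLACE-" "") "TED-" "") "MSEC-" "") "AWS-" ""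
  let par : PySem.Dict String (List (List (String × String))) :=
    questions.foldl (fun d q =>
      let cat := (PySem.Dict.mk q).getD "categorie" "technique"
      let d1 := if d.contains cat then d else d.insert cat []
      d1.modify cat [] (fun l => l ++ [q])) PySem.Dict.empty
  let cat_labels : PySem.Dict String String := PySem.Dict.mk
    [("budget", "Questions budgetaires"), ("technique", "Questions techniques"),
     ("administratif", "Questions administratives"), ("planning", "Questions sur le planning")]
  let lignes : List String :=
    ["Objet : Demande de precisions - " ++ PySem.Str.slice titre none (some 80),
     "", "Madame, Monsieur,", "",
     "Dans le cadre de notre reponse a la consultation \"" ++ PySem.Str.slice titre none (some 100) ++ "\"" ++ (if ref ≠ "" then " (ref. " ++ ref ++ ")" else "") ++ ", nous souhaiterions obtenir les precisions suivantes afin de vous proposer une offre la plus adaptee possible :",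
     ""]
  let st := ["technique", "budget", "planning", "administratif"].foldl
    (fun (st : List String × Int) cat_id =>
      if !(par.contains cat_id) then st
      else
        let st1 : List String × Int := (st.1 ++ ["--- " ++ cat_labels.getD cat_id cat_id ++ " ---", ""], st.2)
        let st2 := (par.getD cat_id []).foldl
          (fun (p : List String × Int) q =>
            (p.1 ++ [PySem.Int.toStr p.2 ++ ". " ++ (((PySem.Dict.mk q).get? "question").getD "")], p.2 + 1)) st1
        (st2.1 ++ [""], st2.2))
    (lignes, (1 : Int))
  PySem.Str.join "\n"
    (st.1 ++
     ["Nous vous remercions par avance pour ces precisions qui nous permettront de formuler une offre de qualite.",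
      "", "Cordialement,", "", "Mickael Bertolla", "President - Almera (AI MENTOR)",
      "25 rue Campagne Premiere, 75014 Paris", "Tel : 06 86 68 06 11", "Email : contact@almera.one"])

-- ===== PORT B =====
def pvLabel (c : String) : String :=
  (((PySem.Dict.mk
      [("technique", "Questions techniques"), ("budget", "Questions budgetaires"),
       ("planning", "Questions sur le planning"), ("administratif", "Questions administratives")]).get? c).getD "")

def pvEntete (titre ref : String) : List String :=
  ["Objet : Demande de precisions - " ++ PySem.Str.slice titre none (some 80),
   "", "Madame, Monsieur,", "",
   "Dans le cadre de notre reponse a la consultation \"" ++ PySem.Str.slice titre none (some 100) ++ "\"" ++ (if ref ≠ "" then " (ref. " ++ ref ++ ")" else "") ++ ", nous souhaiterions obtenir les precisions suivantes afin de vous proposer une offre la plus adaptee possible :",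
   ""]

def pvPied : List String :=
  ["Nous vous remercions par avance pour ces precisions qui nous permettront de formuler une offre de qualite.",
   "", "Cordialement,", "", "Mickael Bertolla", "President - Almera (AI MENTOR)",
   "25 rue Campagne Premiere, 75014 Paris", "Tel : 06 86 68 06 11", "Email : contact@almera.one"]

-- literal transliteration of B (Source B): no grouping dict, one filter per category.
def formater_questions_email_alt (questions : List (List (String × String))) (ao : List (String × String)) : String :=
  let aoD := PySem.Dict.mk ao
  let titre := aoD.getD "titre" "la consultation"
  let ref := PySem.Str.replace (PySem.Str.replace (PySem.Str.replace (PySem.Str.replace (PySem.Str.replace (aoD.getD "id" "") "BOAMP-" "") "PLACE-" "") "TED-" "") "MSEC-" "") "AWS-" ""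
  let st := ["technique", "budget", "planning", "administratif"].foldl
    (fun (st : List String × Int) cat_id =>
      let matching := questions.filter (fun q => (PySem.Dict.mk q).getD "categorie" "technique" == cat_id)
      if matching.isEmpty then st
      else
        let st1 : List String × Int := (st.1 ++ ["--- " ++ pvLabel cat_id ++ " ---", ""], st.2)
        let st2 := matching.foldl
          (fun (p : List String × Int) q =>
            (p.1 ++ [PySem.Int.toStr p.2 ++ ". " ++ (((PySem.Dict.mk q).get? "question").getD "")], p.2 + 1)) st1
        (st2.1 ++ [""], st2.2))
    (pvEntete titre ref, (1 : Int))
  PySem.Str.join "\n" (st.1 ++ pvPied)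

-- ===== PRECONDITION & SPEC =====
-- Pre_ excludes exactly the inputs where Python A raises KeyError: a question whose (defaulted)
-- category is one of the four emitted ones but which has no "question" key.
def Pre_formater_questions_email (questions : List (List (String × String))) (ao : List (String × String)) : Prop :=
  ∀ q ∈ questions,
    (PySem.Dict.mk q).getD "categorie" "technique" ∈ (["technique", "budget", "planning", "administratif"] : List String) →
    (PySem.Dict.mk q).contains "question" = true
instance (questions : List (List (String × String))) (ao : List (String × String)) : Decidable (Pre_formater_questions_email questions ao) := by unfold Pre_formater_questions_email; infer_instance
def pvWitness_formater_questions_email : (List (List (String × String))) × (List (String × String)) :=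
  ([[("question", "Quel est le delai ?")], [("question", "Quel budget ?"), ("categorie", "budget")]],
   [("titre", "Renovation"), ("id", "BOAMP-77")])
def Spec_formater_questions_email (questions : List (List (String × String))) (ao : List (String × String)) (out : String) : Prop := out = formater_questions_email_alt questions ao
instance (questions : List (List (String × String))) (ao : List (String × String)) (out : String) : Decidable (Spec_formater_questions_email questions ao out) := by unfold Spec_formater_questions_email; infer_instance

-- ===== CLAIM (what is proved, stated in full; the proofs are below) =====
def Claim_equal_formater_questions_email : Prop := ∀ (questions : List (List (String × String))) (ao : List (String × String)), Dom_formater_questions_email questions ao → Pre_formater_questions_email questions ao → Spec_formater_questions_email questions ao (formater_questions_email questions ao)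

-- ===== LEMMAS AND PROOFS =====

-- the effective category of a question
def pvKey (q : List (String × String)) : String := (PySem.Dict.mk q).getD "categorie" "technique"

theorem pv_map_id {A : Type} (l : List A) (f : A → A) (h : ∀ x ∈ l, f x = x) : l.map f = l := by
  induction l with
  | nil => rfl
  | cons x xs ih => simp_all

-- A's two-step "if cat not in d: d[cat]=[]; d[cat].append(q)" equals a single modify
theorem pv_step_collapse {X : Type} (d : PySem.Dict String (List X)) (cat : String) (f : List X → List X) :
    (if d.contains cat then d else d.insert cat []).modify cat [] f = d.modify cat [] f := by
  by_cases h : d.contains cat = true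
  · simp [h]
  · rw [Bool.not_eq_true] at h
    simp only [h, Bool.false_eq_true, if_false]
    unfold PySem.Dict.modify
    rw [PySem.Dict.getD_insert_self, PySem.Dict.getD_of_not_contains d _ h]
    apply PySem.Dict.ext
    rw [PySem.Dict.items_insert_of_contains _ _ (PySem.Dict.contains_insert_self d cat []),
        PySem.Dict.items_insert_of_not_contains d _ h,
        PySem.Dict.items_insert_of_not_contains d _ h]
    rw [List.map_append]
    congr 1
    · apply pv_map_id
      intro p hp
      have : ¬ (p.1 == cat) = true := by
        intro hc
        have : d.contains cat = true := by
          rcases d with ⟨items⟩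
          rw [PySem.Dict.contains_mk]
          exact List.any_eq_true.mpr ⟨p, hp, hc⟩
        simp [this] at h
      simp [this]
    · simp

-- getD on the grouping dict is the filter of the input
theorem pv_build_getD (qs : List (List (String × String))) (d : PySem.Dict String (List (List (String × String)))) (c : String) :
    (qs.foldl (fun d q =>
        (if d.contains (pvKey q) then d else d.insert (pvKey q) []).modify (pvKey q) [] (fun l => l ++ [q])) d).getD c []
      = d.getD c [] ++ qs.filter (fun q => pvKey q == c) := by
  induction qs generalizing d with
  | nil => simp
  | cons q qs ih =>
    simp only [List.foldl_cons, List.filter_cons]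
    rw [ih, pv_step_collapse, PySem.Dict.getD_modify]
    by_cases h : pvKey q == c
    · have hc : c = pvKey q := (beq_iff_eq.mp h).symm
      simp [hc]
    · have hc : ¬ c = pvKey q := fun e => h (beq_iff_eq.mpr e.symm)
      simp [h, hc]

-- membership in the grouping dict is non-emptiness of the filter
theorem pv_build_contains (qs : List (List (String × String))) (d : PySem.Dict String (List (List (String × String)))) (c : String) :
    (qs.foldl (fun d q =>
        (if d.contains (pvKey q) then d else d.insert (pvKey q) []).modify (pvKey q) [] (fun l => l ++ [q])) d).contains c
      = (d.contains c || qs.any (fun q => pvKey q == c)) := by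
  induction qs generalizing d with
  | nil => simp
  | cons q qs ih =>
    simp only [List.foldl_cons, List.any_cons]
    rw [ih, pv_step_collapse, PySem.Dict.contains_modify]
    by_cases h : pvKey q == c
    · have : (c == pvKey q) = true := by simp_all [beq_iff_eq]
      simp [h, this]
    · have : (c == pvKey q) = false := by simp_all [beq_iff_eq]; exact fun e => h e.symm
      simp [h, this]

theorem pv_isEmpty_filter {α : Type} (p : α → Bool) (xs : List α) :
    (xs.filter p).isEmpty = !(xs.any p) := by
  induction xs with
  | nil => rfl
  | cons x xs ih => by_cases h : p x <;> simp [List.any_cons, h, ih]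

-- ===== VERDICT (by name: the statement is the Claim_ definition above) =====
theorem formater_questions_email_spec : Claim_equal_formater_questions_email := by
  intro questions ao _ _
  unfold Spec_formater_questions_email formater_questions_email formater_questions_email_alt
  simp only [pvEntete, pvPied]
  congr 2
  refine congrArg Prod.fst ?_
  apply PySem.List.foldl_congr_mem
  intro acc cat hc
  have hcont := pv_build_contains questions PySem.Dict.empty cat
  have hgetD := pv_build_getD questions PySem.Dict.empty cat
  simp only [pvKey] at hcont hgetD
  rw [hcont, hgetD, PySem.Dict.contains_empty, PySem.Dict.getD_empty, Bool.false_or, List.nil_append,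
      pv_isEmpty_filter]
  fin_cases hc <;> rfl
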